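-- pv_equiv track=rewrite | github.com/baller70/BasketballAnalysisAssessmentApp | python-scraper/wsi_scraper.py | get_tier_from_wsi
-- ===== SOURCE A (Python) =====
-- WSI_TIERS = {
--     'legendary': 38,  # With achievements
--     'elite': 35,
--     'great': 30,
--     'good': 25,
--     'mid_level': 18,
--     'bad': 0  # Anything below mid_level
-- }
--
-- def get_tier_from_wsi(wsi, achievements=None):
--     """Determine tier based on WSI score."""
--     ach_text = ' '.join(achievements).lower() if achievements else ''
--     has_major_achievement = any(x in ach_text for x in ['mvp', 'champion', 'hall of fame', 'all-star'])
--
--     if wsi >= WSI_TIERS['legendary'] and has_major_achievement: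
--         return 'legendary'
--     elif wsi >= WSI_TIERS['elite']:
--         return 'elite'
--     elif wsi >= WSI_TIERS['great']:
--         return 'great'
--     elif wsi >= WSI_TIERS['good']:
--         return 'good'
--     elif wsi >= WSI_TIERS['mid_level']:
--         return 'mid_level'
--     else:
--         return 'bad'
-- ===== SOURCE B (Python) =====
-- def get_tier_from_wsi(wsi, achievements=None):
--     """Determine tier by counting passed thresholds into an index, then a table lookup."""
--     ach_text = ' '.join(achievements).lower() if achievements else ''
--     has_major_achievement = any(x in ach_text for x in ['mvp', 'champion', 'hall of fame', 'all-star'])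
--     idx = sum(wsi >= t for t in (18, 25, 30, 35))
--     if idx == 4 and wsi >= 38 and has_major_achievement:
--         return 'legendary'
--     return ('bad', 'mid_level', 'good', 'great', 'elite')[idx]
-- ===== Notes on version B (the rewrite author's own statement) =====
-- stated objective: alternative
-- what changed: Replaces the if-elif cascade of early returns with arithmetic rank classification: count how many thresholds the score meets to get an index, look the tier name up in a table, with 'legendary' as a post-hoc upgrade of the top rank.
import Mathlib
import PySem

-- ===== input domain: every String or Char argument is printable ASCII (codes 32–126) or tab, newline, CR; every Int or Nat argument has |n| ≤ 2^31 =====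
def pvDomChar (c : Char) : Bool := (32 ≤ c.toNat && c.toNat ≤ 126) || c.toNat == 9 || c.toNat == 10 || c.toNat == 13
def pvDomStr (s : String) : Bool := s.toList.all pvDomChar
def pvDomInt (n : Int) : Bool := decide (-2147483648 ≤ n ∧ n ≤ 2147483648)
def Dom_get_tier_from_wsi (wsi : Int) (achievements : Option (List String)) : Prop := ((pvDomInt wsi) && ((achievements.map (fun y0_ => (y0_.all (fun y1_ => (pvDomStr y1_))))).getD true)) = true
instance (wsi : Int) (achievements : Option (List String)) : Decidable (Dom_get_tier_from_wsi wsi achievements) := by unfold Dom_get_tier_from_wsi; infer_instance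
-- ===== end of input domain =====

-- B replaces A's if-elif cascade of early returns by arithmetic rank classification
-- (count the thresholds met, index a name table, upgrade the top rank to 'legendary'); same cost.

-- ===== PORT A =====
def get_tier_from_wsi (wsi : Int) (achievements : Option (List String)) : String :=
  let ach_text : String :=
    match achievements with
    | none => ""
    | some l => if l.isEmpty then "" else PySem.Str.lower (PySem.Str.join " " l)
  let has_major_achievement : Bool :=
    ["mvp", "champion", "hall of fame", "all-star"].any (fun x => PySem.Str.isIn x ach_text)
  if wsi ≥ 38 ∧ has_major_achievement then "legendary"
  else if wsi ≥ 35 then "elite"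
  else if wsi ≥ 30 then "great"
  else if wsi ≥ 25 then "good"
  else if wsi ≥ 18 then "mid_level"
  else "bad"

-- ===== PORT B =====
-- number of thresholds the score meets (Python's sum of booleans over the tuple)
def tierIdx (wsi : Int) : Int :=
  [(18 : Int), 25, 30, 35].foldl (fun acc t => acc + (if wsi ≥ t then 1 else 0)) 0

def get_tier_from_wsi_alt (wsi : Int) (achievements : Option (List String)) : String :=
  let ach_text : String :=
    match achievements with
    | none => ""
    | some l => if l.isEmpty then "" else PySem.Str.lower (PySem.Str.join " " l)
  let has_major_achievement : Bool :=
    ["mvp", "champion", "hall of fame", "all-star"].any (fun x => PySem.Str.isIn x ach_text)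
  let idx := tierIdx wsi
  if idx = 4 ∧ wsi ≥ 38 ∧ has_major_achievement then "legendary"
  else ["bad", "mid_level", "good", "great", "elite"].getD idx.toNat "bad"

-- ===== PRECONDITION & SPEC =====
def Spec_get_tier_from_wsi (wsi : Int) (achievements : Option (List String)) (out : String) : Prop := out = get_tier_from_wsi_alt wsi achievements
instance (wsi : Int) (achievements : Option (List String)) (out : String) : Decidable (Spec_get_tier_from_wsi wsi achievements out) := by unfold Spec_get_tier_from_wsi; infer_instance

-- ===== CLAIM (what is proved, stated in full; the proofs are below) =====
def Claim_equal_get_tier_from_wsi : Prop := ∀ (wsi : Int) (achievements : Option (List String)), Dom_get_tier_from_wsi wsi achievements → Spec_get_tier_from_wsi wsi achievements (get_tier_from_wsi wsi achievements)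

-- ===== LEMMAS AND PROOFS =====

-- the cascade and the rank-index lookup agree for every score and any value of the achievement flag
theorem cascade_eq_rank (wsi : Int) (hm : Bool) :
    (if wsi ≥ 38 ∧ hm then "legendary"
     else if wsi ≥ 35 then "elite"
     else if wsi ≥ 30 then "great"
     else if wsi ≥ 25 then "good"
     else if wsi ≥ 18 then "mid_level"
     else "bad") =
    (if tierIdx wsi = 4 ∧ wsi ≥ 38 ∧ hm then "legendary"
     else ["bad", "mid_level", "good", "great", "elite"].getD (tierIdx wsi).toNat "bad") := by
  simp only [tierIdx, List.foldl]
  cases hm <;> split_ifs <;> simp_all <;> omega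

-- ===== VERDICT (by name: the statement is the Claim_ definition above) =====
theorem get_tier_from_wsi_spec : Claim_equal_get_tier_from_wsi := by
  intro wsi achievements _
  exact cascade_eq_rank wsi _
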